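-- pv_equiv track=rewrite | github.com/subhankarshukla04/finance-digest | digest.py | format_summary_html
-- ===== SOURCE A (Python) =====
-- def format_summary_html(summary: str) -> str:
--     if not summary:
--         return ('<div class="section-block">'
--                 '<div class="section-hd">Analysis</div>'
--                 '<div class="section-body"><p style="color:var(--text-3)">Summary unavailable — see articles below.</p></div>'
--                 '</div>')
--
--     blocks = []
--     current_title = None
--     current_lines = []
--
--     for line in summary.splitlines():
--         line = line.strip()
--         if not line:
--             continue
--         if line.startswith("## "):
--             if current_title is not None:
--                 blocks.append((current_title, current_lines))
--             current_title = line[3:].strip()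
--             current_lines = []
--         else:
--             current_lines.append(line)
--
--     if current_title is not None:
--         blocks.append((current_title, current_lines))
--
--     html = '<div class="analysis">'
--     for title, lines in blocks:
--         inner = ""
--         for line in lines:
--             if line.startswith(("• ", "- ", "* ")):
--                 inner += f'<p class="bullet">{line[2:].strip()}</p>\n'
--             else:
--                 inner += f'<p>{line}</p>\n'
--         html += (f'<div class="section-block">'
--                  f'<div class="section-hd">{title}</div>'
--                  f'<div class="section-body">{inner}</div>'
--                  f'</div>\n')
--     html += '</div>'
--     return html
-- ===== SOURCE B (Python) =====
-- def format_summary_html(summary: str) -> str: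
--     """Single streaming pass: emit each section as soon as the next heading
--     closes it, instead of building an intermediate blocks list."""
--     if not summary:
--         return ('<div class="section-block">'
--                 '<div class="section-hd">Analysis</div>'
--                 '<div class="section-body"><p style="color:var(--text-3)">Summary unavailable — see articles below.</p></div>'
--                 '</div>')
--
--     html = '<div class="analysis">'
--     title = None
--     inner = ""
--
--     for raw in summary.splitlines():
--         line = raw.strip()
--         if not line:
--             continue
--         if line.startswith("## "):
--             if title is not None:
--                 html += (f'<div class="section-block">'
--                          f'<div class="section-hd">{title}</div>'
--                          f'<div class="section-body">{inner}</div>'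
--                          f'</div>\n')
--             title = line[3:].strip()
--             inner = ""
--         elif title is not None:
--             if line.startswith(("• ", "- ", "* ")):
--                 inner += f'<p class="bullet">{line[2:].strip()}</p>\n'
--             else:
--                 inner += f'<p>{line}</p>\n'
--
--     if title is not None:
--         html += (f'<div class="section-block">'
--                  f'<div class="section-hd">{title}</div>'
--                  f'<div class="section-body">{inner}</div>'
--                  f'</div>\n')
--     return html + '</div>'
-- ===== Notes on version B (the rewrite author's own statement) =====
-- stated objective: simpler
-- what changed: Replaced A's two-phase design (collect an intermediate blocks list of (title, lines), then a second nested loop rendering it) by a single streaming pass that emits each section's HTML as soon as the next heading or the end of input closes it.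
import Mathlib
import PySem

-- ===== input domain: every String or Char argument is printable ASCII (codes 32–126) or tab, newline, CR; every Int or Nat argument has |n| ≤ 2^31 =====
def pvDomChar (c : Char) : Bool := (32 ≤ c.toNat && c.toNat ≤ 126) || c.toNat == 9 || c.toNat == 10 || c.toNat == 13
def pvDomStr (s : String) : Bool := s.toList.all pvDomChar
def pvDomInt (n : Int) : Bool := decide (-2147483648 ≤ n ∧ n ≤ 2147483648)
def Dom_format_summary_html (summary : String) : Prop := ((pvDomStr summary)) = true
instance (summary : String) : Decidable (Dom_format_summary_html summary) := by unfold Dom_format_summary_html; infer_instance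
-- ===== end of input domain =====

-- B replaces A's two-phase design (collect a blocks list, then render it) by one
-- streaming pass that emits each section's HTML as soon as it is closed (objective: simpler).

def pvEmptyMsg : String :=
  "<div class=\"section-block\"><div class=\"section-hd\">Analysis</div><div class=\"section-body\"><p style=\"color:var(--text-3)\">Summary unavailable — see articles below.</p></div></div>"

-- ===== PORT A =====
-- state: (blocks, current_title, current_lines)
def pvCollectA (st : List (String × List String) × Option String × List String)
    (raw : String) : List (String × List String) × Option String × List String :=
  let line := PySem.Str.strip raw
  if line = "" then st
  else if PySem.Str.startswith line "## " then
    match st with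
    | (blocks, some t, ls) =>
        (blocks ++ [(t, ls)], some (PySem.Str.strip (PySem.Str.slice line (some 3) none)), [])
    | (blocks, none, _) =>
        (blocks, some (PySem.Str.strip (PySem.Str.slice line (some 3) none)), [])
  else
    match st with
    | (blocks, t?, ls) => (blocks, t?, ls ++ [line])

def pvParaA (line : String) : String :=
  if PySem.Str.startswith line "• " || PySem.Str.startswith line "- " ||
      PySem.Str.startswith line "* " then
    "<p class=\"bullet\">" ++ PySem.Str.strip (PySem.Str.slice line (some 2) none) ++ "</p>\n"
  else
    "<p>" ++ line ++ "</p>\n"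

def pvRenderBlockA (html : String) (b : String × List String) : String :=
  html ++ ("<div class=\"section-block\"><div class=\"section-hd\">" ++ b.1 ++
    "</div><div class=\"section-body\">" ++
    (b.2.foldl (fun inner l => inner ++ pvParaA l) "") ++ "</div></div>\n")

def format_summary_html (summary : String) : String :=
  if summary = "" then pvEmptyMsg
  else
    let st := (PySem.Str.splitlines summary).foldl pvCollectA ([], none, [])
    let blocks :=
      match st with
      | (bs, some t, ls) => bs ++ [(t, ls)]
      | (bs, none, _) => bs
    (blocks.foldl pvRenderBlockA "<div class=\"analysis\">") ++ "</div>"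

-- ===== PORT B =====
def pvParaB (line : String) : String :=
  if PySem.Str.startswith line "• " || PySem.Str.startswith line "- " ||
      PySem.Str.startswith line "* " then
    "<p class=\"bullet\">" ++ PySem.Str.strip (PySem.Str.slice line (some 2) none) ++ "</p>\n"
  else
    "<p>" ++ line ++ "</p>\n"

-- close the currently open section (title, inner), if any, onto html
def pvCloseB (html : String) (cur : Option (String × String)) : String :=
  match cur with
  | none => html
  | some (t, inner) =>
      html ++ ("<div class=\"section-block\"><div class=\"section-hd\">" ++ t ++
        "</div><div class=\"section-body\">" ++ inner ++ "</div></div>\n")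

-- state: (html so far, open section as (title, inner))
def pvStepB (st : String × Option (String × String)) (raw : String) :
    String × Option (String × String) :=
  let line := PySem.Str.strip raw
  if line = "" then st
  else if PySem.Str.startswith line "## " then
    (pvCloseB st.1 st.2, some (PySem.Str.strip (PySem.Str.slice line (some 3) none), ""))
  else
    match st.2 with
    | none => st
    | some (t, inner) => (st.1, some (t, inner ++ pvParaB line))

def format_summary_html_alt (summary : String) : String :=
  if summary = "" then pvEmptyMsg
  else
    let st := (PySem.Str.splitlines summary).foldl pvStepB ("<div class=\"analysis\">", none)
    pvCloseB st.1 st.2 ++ "</div>"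

-- ===== PRECONDITION & SPEC =====
def Spec_format_summary_html (summary : String) (out : String) : Prop := out = format_summary_html_alt summary
instance (summary : String) (out : String) : Decidable (Spec_format_summary_html summary out) := by unfold Spec_format_summary_html; infer_instance

-- ===== CLAIM (what is proved, stated in full; the proofs are below) =====
def Claim_equal_format_summary_html : Prop := ∀ (summary : String), Dom_format_summary_html summary → Spec_format_summary_html summary (format_summary_html summary)

-- ===== LEMMAS AND PROOFS =====

-- B's state corresponding to an A state, over a base html H
def pvAbs (H : String) (st : List (String × List String) × Option String × List String) :
    String × Option (String × String) :=
  (st.1.foldl pvRenderBlockA H,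
   st.2.1.map (fun t => (t, st.2.2.foldl (fun inner l => inner ++ pvParaA l) "")))

lemma pvParaB_eq_paraA (line : String) : pvParaB line = pvParaA line := rfl

-- one loop step preserves the correspondence
lemma pvStep_abs (H : String) (st : List (String × List String) × Option String × List String)
    (raw : String) : pvStepB (pvAbs H st) raw = pvAbs H (pvCollectA st raw) := by
  obtain ⟨bs, t?, cl⟩ := st
  simp only [pvStepB, pvCollectA]
  by_cases h0 : PySem.Str.strip raw = ""
  · simp [h0]
  · by_cases h1 : PySem.Chars.startswith (PySem.Chars.strip raw.toList) ['#', '#', ' ']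
    · cases t? <;> simp [h0, h1, pvAbs, pvCloseB, List.foldl_append, pvRenderBlockA]
    · cases t? <;> simp [h0, h1, pvAbs, List.foldl_append, pvParaB_eq_paraA]

-- the whole loop preserves it
lemma pvFold_abs (ls : List String) (H : String)
    (st : List (String × List String) × Option String × List String) :
    ls.foldl pvStepB (pvAbs H st) = pvAbs H (ls.foldl pvCollectA st) := by
  induction ls generalizing st with
  | nil => rfl
  | cons l ls ih => simp only [List.foldl_cons, pvStep_abs, ih]

-- closing the final section equals rendering the finalized blocks
lemma pvClose_abs (H : String) (st : List (String × List String) × Option String × List String) :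
    pvCloseB (pvAbs H st).1 (pvAbs H st).2 =
      (match st with
        | (bs, some t, ls) => bs ++ [(t, ls)]
        | (bs, none, _) => bs).foldl pvRenderBlockA H := by
  obtain ⟨bs, t?, cl⟩ := st
  cases t? <;> simp [pvAbs, pvCloseB, List.foldl_append, pvRenderBlockA]

-- ===== VERDICT (by name: the statement is the Claim_ definition above) =====
theorem format_summary_html_spec : Claim_equal_format_summary_html := by
  intro summary _
  unfold Spec_format_summary_html format_summary_html format_summary_html_alt
  by_cases h : summary = ""
  · simp [h]
  · simp only [h, if_false]
    have habs : ("<div class=\"analysis\">", (none : Option (String × String))) =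
        pvAbs "<div class=\"analysis\">" ([], none, []) := rfl
    rw [habs, pvFold_abs, pvClose_abs]
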